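-- pv_equiv track=rewrite | github.com/kelvinhuang0327/number-pattern-research | tools/review_power_020.py | cold_scores
-- ===== SOURCE A (Python) =====
-- MAX_NUM = 38
--
-- def cold_scores(hist, window=100):
--     """冷號分數 (現在gap越大分數越高)"""
--     recent = hist[-window:] if len(hist) >= window else hist
--     last_seen = {}
--     for i, d in enumerate(recent):
--         for n in d['numbers']:
--             if n <= MAX_NUM:
--                 last_seen[n] = i
--     current = len(recent)
--     gaps = {}
--     for n in range(1, MAX_NUM + 1):
--         gaps[n] = current - last_seen.get(n, -1)
--     return gaps
-- ===== SOURCE B (Python) =====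
-- MAX_NUM = 38
--
-- def cold_scores(hist, window=100):
--     """冷號分數 (現在gap越大分數越高): single backward scan tracking distance from the end."""
--     recent = hist[-window:] if len(hist) >= window else hist
--     current = len(recent)
--     gaps = {n: current + 1 for n in range(1, MAX_NUM + 1)}
--     seen = set()
--     for dist, d in enumerate(reversed(recent), 1):
--         for n in d['numbers']:
--             if 1 <= n <= MAX_NUM and n not in seen:
--                 gaps[n] = dist
--                 seen.add(n)
--     return gaps
-- ===== Notes on version B (the rewrite author's own statement) =====
-- stated objective: alternative
-- what changed: Replaces A's two-phase approach (build a forward last-seen index table over the window, then subtract each index from the window length) by a single backward scan over the reversed window that records each number's distance from the end on first sight, with unseen numbers pre-initialised to window+1.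
-- outside the precondition, e.g. on cold_scores([{'nums': [1]}], 100): A raises KeyError, B raises KeyError
import Mathlib
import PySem

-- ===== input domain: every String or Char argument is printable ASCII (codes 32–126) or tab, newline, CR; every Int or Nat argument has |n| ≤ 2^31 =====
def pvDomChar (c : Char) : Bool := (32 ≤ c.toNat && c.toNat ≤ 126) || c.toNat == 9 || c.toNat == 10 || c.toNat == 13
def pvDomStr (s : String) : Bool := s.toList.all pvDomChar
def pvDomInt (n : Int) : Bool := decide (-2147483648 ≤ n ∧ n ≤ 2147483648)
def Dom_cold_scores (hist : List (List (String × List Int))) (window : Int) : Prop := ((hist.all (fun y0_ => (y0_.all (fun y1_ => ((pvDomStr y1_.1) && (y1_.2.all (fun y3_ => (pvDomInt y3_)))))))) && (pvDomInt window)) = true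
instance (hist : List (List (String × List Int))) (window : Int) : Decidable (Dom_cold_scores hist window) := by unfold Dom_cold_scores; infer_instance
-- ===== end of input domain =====

-- B replaces A's forward last-seen index table + subtraction pass by a single backward scan
-- that records the distance-from-the-end of each number's most recent occurrence (objective: alternative decomposition).

-- hist[-window:] if len(hist) >= window else hist  (identical line in both Pythons)
def pvRecent (hist : List (List (String × List Int))) (window : Int) : List (List (String × List Int)) :=
  if (hist.length : Int) ≥ window then PySem.List.slice hist (some (-window)) none else hist

-- d['numbers']  (totalised with default []; Pre_ excludes the KeyError inputs)
def pvNums (d : List (String × List Int)) : List Int :=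
  (PySem.Dict.mk d).getD "numbers" []

-- ===== PORT A =====
def cold_scores (hist : List (List (String × List Int))) (window : Int) : List (Int × Int) :=
  let recent := pvRecent hist window
  let last_seen :=
    (PySem.List.enumerate recent 0).foldl
      (fun ls p =>
        (pvNums p.2).foldl (fun ls n => if n ≤ 38 then ls.insert n p.1 else ls) ls)
      PySem.Dict.empty
  let current : Int := (recent.length : Int)
  let gaps :=
    (PySem.List.pyRange 1 39 1).foldl
      (fun g n => g.insert n (current - last_seen.getD n (-1))) PySem.Dict.empty
  gaps.items

-- ===== PORT B =====
def cold_scores_alt (hist : List (List (String × List Int))) (window : Int) : List (Int × Int) :=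
  let recent := pvRecent hist window
  let current : Int := (recent.length : Int)
  let gaps0 :=
    (PySem.List.pyRange 1 39 1).foldl (fun g n => g.insert n (current + 1)) PySem.Dict.empty
  let st :=
    (PySem.List.enumerate recent.reverse 1).foldl
      (fun (st : PySem.Dict Int Int × PySem.Set Int) p =>
        (pvNums p.2).foldl
          (fun (st : PySem.Dict Int Int × PySem.Set Int) n =>
            if 1 ≤ n ∧ n ≤ 38 ∧ PySem.Set.contains st.2 n = false
            then (st.1.insert n p.1, PySem.Set.add st.2 n) else st)
          st)
      (gaps0, PySem.Set.empty)
  st.1.items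

-- ===== PRECONDITION & SPEC =====
-- Pre_ excludes exactly the inputs on which Python A raises KeyError: a draw in the examined
-- window without a 'numbers' key.
def Pre_cold_scores (hist : List (List (String × List Int))) (window : Int) : Prop :=
  ∀ d ∈ pvRecent hist window, "numbers" ∈ d.map Prod.fst
instance (hist : List (List (String × List Int))) (window : Int) : Decidable (Pre_cold_scores hist window) := by unfold Pre_cold_scores; infer_instance

def pvWitness_cold_scores : (List (List (String × List Int))) × Int :=
  ([[("numbers", [3, 7])], [("numbers", [7, 40])]], 100)

def Spec_cold_scores (hist : List (List (String × List Int))) (window : Int) (out : List (Int × Int)) : Prop := out = cold_scores_alt hist window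
instance (hist : List (List (String × List Int))) (window : Int) (out : List (Int × Int)) : Decidable (Spec_cold_scores hist window out) := by unfold Spec_cold_scores; infer_instance

-- ===== CLAIM (what is proved, stated in full; the proofs are below) =====
def Claim_equal_cold_scores : Prop := ∀ (hist : List (List (String × List Int))) (window : Int), Dom_cold_scores hist window → Pre_cold_scores hist window → Spec_cold_scores hist window (cold_scores hist window)

-- ===== LEMMAS AND PROOFS =====

-- index of the first draw (from the front of the given list) containing n
def pvFirstHit (n : Int) : List (List (String × List Int)) → Option Nat
  | [] => none
  | d :: rs => if n ∈ pvNums d then some 0 else (pvFirstHit n rs).map (· + 1)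

-- A, inner loop over one draw
theorem pvA_inner (ns : List Int) (ls : PySem.Dict Int Int) (i n : Int) (hn : n ≤ 38) :
    (ns.foldl (fun ls m => if m ≤ 38 then ls.insert m i else ls) ls).get? n
      = if n ∈ ns then some i else ls.get? n := by
  induction ns generalizing ls with
  | nil => simp
  | cons m ns ih =>
    simp only [List.foldl_cons, ih, List.mem_cons]
    by_cases hmn : n = m
    · subst hmn
      simp [hn, PySem.Dict.get?_insert_self]
    · by_cases hm : m ≤ 38 <;>
        simp [hm, hmn, PySem.Dict.get?_insert_of_ne _ _ (by exact hmn)]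

-- A, outer loop: last_seen.get? n located via the first hit in the reversed list
theorem pvA_outer (xs : List (List (String × List Int))) (ls : PySem.Dict Int Int)
    (s n : Int) (hn : n ≤ 38) :
    ((PySem.List.enumerate xs s).foldl
        (fun ls p => (pvNums p.2).foldl (fun ls m => if m ≤ 38 then ls.insert m p.1 else ls) ls)
        ls).get? n
      = match pvFirstHit n xs.reverse with
        | some j => some (s + ((xs.length : Int) - 1 - (j : Int)))
        | none => ls.get? n := by
  induction xs using List.reverseRecOn generalizing ls with
  | nil => simp [pvFirstHit]
  | append_singleton xs x ih =>
    rw [PySem.List.enumerate_append, List.foldl_append]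
    simp only [PySem.List.enumerate_cons, PySem.List.enumerate_nil, List.foldl_cons, List.foldl_nil]
    rw [pvA_inner _ _ _ _ hn, List.reverse_append]
    simp only [List.reverse_cons, List.reverse_nil, List.nil_append, List.singleton_append,
      pvFirstHit]
    by_cases hx : n ∈ pvNums x
    · simp [hx, List.length_append]
    · simp only [hx, if_false, ih ls]
      cases h : pvFirstHit n xs.reverse with
      | none => simp
      | some j =>
        simp only [Option.map_some]
        congr 1
        simp [List.length_append]
        ring

-- B, inner loop over one draw
theorem pvB_inner (ns : List Int) (g : PySem.Dict Int Int) (seen : PySem.Set Int)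
    (i n : Int) (h1 : 1 ≤ n) (h2 : n ≤ 38)
    (hg : ∀ m : Int, 1 ≤ m → m ≤ 38 → g.contains m = true) :
    let st' := ns.foldl
        (fun (st : PySem.Dict Int Int × PySem.Set Int) m =>
          if 1 ≤ m ∧ m ≤ 38 ∧ PySem.Set.contains st.2 m = false
          then (st.1.insert m i, PySem.Set.add st.2 m) else st)
        (g, seen)
    st'.1.get? n = (if n ∉ seen ∧ n ∈ ns then some i else g.get? n)
      ∧ (n ∈ st'.2 ↔ n ∈ seen ∨ n ∈ ns)
      ∧ st'.1.keys = g.keys := by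
  induction ns generalizing g seen with
  | nil => simp
  | cons m ns ih =>
    simp only [List.foldl_cons]
    by_cases hcond : (1 ≤ m ∧ m ≤ 38 ∧ PySem.Set.contains seen m = false)
    · rw [if_pos hcond]
      have hms : m ∉ seen := by
        intro hmem
        rw [(PySem.Set.contains_iff seen m).2 hmem] at hcond
        exact absurd hcond.2.2 (by simp)
      have hkeys' : (g.insert m i).keys = g.keys :=
        PySem.Dict.keys_insert_of_contains g i (hg m hcond.1 hcond.2.1)
      have hg' : ∀ m' : Int, 1 ≤ m' → m' ≤ 38 → (g.insert m i).contains m' = true := by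
        intro m' a b
        rw [PySem.Dict.contains_insert]
        simp [hg m' a b]
      obtain ⟨e1, e2, e3⟩ := ih (g.insert m i) (PySem.Set.add seen m) hg'
      refine ⟨?_, ?_, by rw [e3, hkeys']⟩
      · rw [e1]
        by_cases hmn : n = m
        · subst hmn
          have : n ∈ PySem.Set.add seen n := (PySem.Set.mem_add seen n n).2 (Or.inr rfl)
          simp [hms, PySem.Dict.get?_insert_self]
        · rw [PySem.Dict.get?_insert_of_ne _ _ (by exact hmn)]
          simp [PySem.Set.mem_add, hmn]
      · rw [e2]
        simp [PySem.Set.mem_add, List.mem_cons]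
        tauto
    · rw [if_neg hcond]
      obtain ⟨e1, e2, e3⟩ := ih g seen hg
      refine ⟨?_, ?_, e3⟩
      · rw [e1]
        by_cases hmn : n = m
        · subst hmn
          have hsn : n ∈ seen := by
            by_contra hno
            exact hcond ⟨h1, h2, by
              cases h' : PySem.Set.contains seen n with
              | false => rfl
              | true => exact absurd ((PySem.Set.contains_iff seen n).1 h') hno⟩
          simp [hsn]
        · simp [List.mem_cons, hmn]
      · rw [e2]
        by_cases hmn : n = m
        · subst hmn
          have hsn : n ∈ seen := by
            by_contra hno
            exact hcond ⟨h1, h2, by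
              cases h' : PySem.Set.contains seen n with
              | false => rfl
              | true => exact absurd ((PySem.Set.contains_iff seen n).1 h') hno⟩
          simp [hsn]
        · simp [List.mem_cons, hmn]

-- B, outer loop
theorem pvB_outer (xs : List (List (String × List Int))) (g : PySem.Dict Int Int)
    (seen : PySem.Set Int) (s n : Int) (h1 : 1 ≤ n) (h2 : n ≤ 38)
    (hg : ∀ m : Int, 1 ≤ m → m ≤ 38 → g.contains m = true) :
    let st' := (PySem.List.enumerate xs s).foldl
        (fun (st : PySem.Dict Int Int × PySem.Set Int) p =>
          (pvNums p.2).foldl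
            (fun (st : PySem.Dict Int Int × PySem.Set Int) m =>
              if 1 ≤ m ∧ m ≤ 38 ∧ PySem.Set.contains st.2 m = false
              then (st.1.insert m p.1, PySem.Set.add st.2 m) else st)
            st)
        (g, seen)
    st'.1.get? n
        = (if n ∉ seen
           then match pvFirstHit n xs with
                | some j => some (s + (j : Int))
                | none => g.get? n
           else g.get? n)
      ∧ st'.1.keys = g.keys := by
  induction xs generalizing g seen s with
  | nil => simp [pvFirstHit]
  | cons d rs ih =>
    rw [PySem.List.enumerate_cons]
    simp only [List.foldl_cons]
    obtain ⟨e1, e2, e3⟩ := pvB_inner (pvNums d) g seen s n h1 h2 hg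
    set st1 := (pvNums d).foldl
        (fun (st : PySem.Dict Int Int × PySem.Set Int) m =>
          if 1 ≤ m ∧ m ≤ 38 ∧ PySem.Set.contains st.2 m = false
          then (st.1.insert m s, PySem.Set.add st.2 m) else st)
        (g, seen) with hst1
    have hg1 : ∀ m : Int, 1 ≤ m → m ≤ 38 → st1.1.contains m = true := by
      intro m a b
      rw [PySem.Dict.contains_iff_mem_keys, e3, ← PySem.Dict.contains_iff_mem_keys]
      exact hg m a b
    obtain ⟨f1, f2⟩ := ih st1.1 st1.2 (s + 1) hg1
    have hpair : st1 = (st1.1, st1.2) := rfl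
    rw [hpair]
    refine ⟨?_, ?_⟩
    · rw [f1, e1]
      by_cases hsn : n ∈ seen
      · have : n ∈ st1.2 := (e2.2 (Or.inl hsn))
        simp [this, hsn]
      · by_cases hd : n ∈ pvNums d
        · have : n ∈ st1.2 := (e2.2 (Or.inr hd))
          simp only [pvFirstHit, hd, if_true, this]
          simp [hsn]
        · have : n ∉ st1.2 := fun h => (e2.1 h).elim hsn hd
          simp only [pvFirstHit, hd, if_false, if_pos this, if_pos hsn]
          cases h' : pvFirstHit n rs with
          | none => simp [hsn]
          | some j =>
            simp only [Option.map_some]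
            congr 1
            push_cast
            ring
    · rw [f2, e3]

-- constant-value insert loop (gaps0)
theorem pv_gaps0_get? (l : List Int) (d : PySem.Dict Int Int) (v n : Int) :
    (l.foldl (fun g k => g.insert k v) d).get? n = if n ∈ l then some v else d.get? n := by
  induction l generalizing d with
  | nil => simp
  | cons k l ih =>
    simp only [List.foldl_cons, ih, List.mem_cons]
    by_cases hkn : n = k
    · subst hkn; simp [PySem.Dict.get?_insert_self]
    · simp [hkn, PySem.Dict.get?_insert_of_ne _ _ (by exact hkn)]

-- gaps0 contains every key 1..38
theorem pv_gaps0_contains (l : List Int) (d : PySem.Dict Int Int) (v m : Int)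
    (hm : m ∈ l) : (l.foldl (fun g k => g.insert k v) d).contains m = true := by
  rw [PySem.Dict.contains_eq_isSome_get?, pv_gaps0_get?]
  simp [hm]

-- ===== VERDICT (by name: the statement is the Claim_ definition above) =====
theorem cold_scores_spec : Claim_equal_cold_scores := by
  intro hist window _ _
  simp only [Spec_cold_scores, cold_scores, cold_scores_alt]
  set recent := pvRecent hist window with hrec
  set current : Int := (recent.length : Int) with hcur
  set lastA := (PySem.List.enumerate recent 0).foldl
      (fun ls p => (pvNums p.2).foldl (fun ls n => if n ≤ 38 then ls.insert n p.1 else ls) ls)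
      PySem.Dict.empty with hlastA
  set gaps0 := (PySem.List.pyRange 1 39 1).foldl
      (fun g n => g.insert n (current + 1)) PySem.Dict.empty with hgaps0
  have hg0 : ∀ m : Int, 1 ≤ m → m ≤ 38 → gaps0.contains m = true := by
    intro m a b
    exact pv_gaps0_contains _ _ _ _ (PySem.List.mem_pyRange_one.2 ⟨a, by omega⟩)
  have keys0 : gaps0.keys = PySem.List.pyRange 1 39 1 := by
    rw [hgaps0,
      PySem.Dict.keys_foldl_insert (PySem.List.pyRange 1 39 1) (fun _ _ => current + 1)
        PySem.Dict.empty,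
      PySem.Dict.keys_empty, PySem.Set.update_nil_left,
      PySem.Set.ofList_eq_self_of_nodup _ (PySem.List.nodup_pyRange_one 1 39)]
  set stB := (PySem.List.enumerate recent.reverse 1).foldl
      (fun (st : PySem.Dict Int Int × PySem.Set Int) p =>
        (pvNums p.2).foldl
          (fun (st : PySem.Dict Int Int × PySem.Set Int) m =>
            if 1 ≤ m ∧ m ≤ 38 ∧ PySem.Set.contains st.2 m = false
            then (st.1.insert m p.1, PySem.Set.add st.2 m) else st)
          st)
      (gaps0, PySem.Set.empty) with hstB
  have bkeys : stB.1.keys = gaps0.keys :=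
    (pvB_outer recent.reverse gaps0 PySem.Set.empty 1 1 le_rfl (by norm_num) hg0).2
  rw [PySem.Dict.items_foldl_insert_fresh (PySem.List.pyRange 1 39 1) (fun n => n)
        (fun n => current - lastA.getD n (-1)) PySem.Dict.empty
        (fun a _ => PySem.Dict.contains_empty a)
        (by simpa using PySem.List.nodup_pyRange_one 1 39),
      PySem.Dict.items_eq_map_keys stB.1
        (by rw [bkeys, keys0]; exact PySem.List.nodup_pyRange_one 1 39) 0,
      bkeys, keys0]
  have hemp : (PySem.Dict.empty : PySem.Dict Int Int).items = [] := rfl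
  rw [hemp, List.nil_append]
  apply List.map_congr_left
  intro n hn
  obtain ⟨hn1, hn2⟩ := PySem.List.mem_pyRange_one.1 hn
  have hB := (pvB_outer recent.reverse gaps0 PySem.Set.empty 1 n hn1 (by omega) hg0).1
  have hA := pvA_outer recent PySem.Dict.empty 0 n (by omega)
  have hne : n ∉ (PySem.Set.empty : PySem.Set Int) := by simp [PySem.Set.empty]
  refine Prod.ext rfl ?_
  show current - lastA.getD n (-1) = stB.1.getD n 0
  rw [PySem.Dict.getD_eq_get?_getD, PySem.Dict.getD_eq_get?_getD, hA, hB, if_pos hne]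
  cases h : pvFirstHit n recent.reverse with
  | none =>
    rw [hgaps0, pv_gaps0_get?]
    simp only [Option.getD_none, Option.getD_some, PySem.Dict.get?_empty,
      if_pos (PySem.List.mem_pyRange_one.2 ⟨hn1, by omega⟩)]
    omega
  | some j =>
    simp only [Option.getD_some]
    omega
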